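-- pv_equiv track=rewrite | github.com/quantumlib/OpenFermion-FQE | src/fqe/util.py | paritysort_int
-- ===== SOURCE A (Python) =====
-- from typing import Any, Generator, KeysView, List, Set, Tuple, TYPE_CHECKING
--
-- def paritysort_int(arr: List[int]) -> Tuple[int, List[int]]:
--     """Move all even numbers to the left and all odd numbers to the right
--
--     Args:
--         arr list[int] - a list of integers to be sorted
--
--     Returns:
--         arr [list] - mutated in place
--         swap_count (int) - number of exchanges needed to complete the sorting
--     """
--     larr = len(arr)
--     parr = [[i % 2, i] for i in arr]
--
--     swap_count = 0
--     for i in range(larr):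
--         swapped = False
--         for j in range(0, larr - i - 1):
--             if parr[j][0] > parr[j + 1][0]:
--                 parr[j], parr[j + 1] = parr[j + 1], parr[j]
--                 swapped = True
--                 swap_count += 1
--         if not swapped:
--             break
--
--     for indx, val in enumerate(parr):
--         arr[indx] = val[1]
--
--     return swap_count, arr
-- ===== SOURCE B (Python) =====
-- from typing import List, Tuple
--
-- def paritysort_int(arr: List[int]) -> Tuple[int, List[int]]:
--     """One pass: swap count = inversions (odds seen before each even);
--     result = stable partition evens-then-odds. Mutates arr in place like A."""
--     swaps = 0
--     odds_seen = 0
--     evens: List[int] = []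
--     odds: List[int] = []
--     for x in arr:
--         if x % 2 == 0:
--             swaps += odds_seen
--             evens.append(x)
--         else:
--             odds_seen += 1
--             odds.append(x)
--     arr[:] = evens + odds
--     return swaps, arr
-- ===== Notes on version B (the rewrite author's own statement) =====
-- stated objective: faster
-- what changed: Replaced bubble sort over (parity,value) pairs by a single pass that counts odds seen so far (summing them at each even = inversion count) and builds the stable evens-then-odds partition directly.
import Mathlib
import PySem

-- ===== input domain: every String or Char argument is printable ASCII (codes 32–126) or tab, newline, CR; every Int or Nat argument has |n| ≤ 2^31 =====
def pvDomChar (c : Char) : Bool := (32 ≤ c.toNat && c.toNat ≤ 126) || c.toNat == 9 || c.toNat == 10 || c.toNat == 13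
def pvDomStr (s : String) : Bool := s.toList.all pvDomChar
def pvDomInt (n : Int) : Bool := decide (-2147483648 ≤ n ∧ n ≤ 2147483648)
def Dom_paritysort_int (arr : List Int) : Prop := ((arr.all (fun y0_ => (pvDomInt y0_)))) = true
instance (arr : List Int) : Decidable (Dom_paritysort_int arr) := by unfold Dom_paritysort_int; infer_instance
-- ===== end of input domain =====

-- B replaces A's bubble sort by one linear pass (odds-seen inversion count + stable partition); equivalence is about the
-- returned value — both Pythons also write the partitioned list back into `arr` in place.

-- ===== PORT A =====
-- inner loop `for j in range(0, larr-i-1): compare/swap parr[j], parr[j+1]`, as structural recursion: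
-- each iteration settles index j (the head) and continues with one comparison fewer; returns (parr, swaps done, swapped)
def psortInner : List (Int × Int) → Nat → List (Int × Int) × Int × Bool
  | l, 0 => (l, 0, false)
  | [], _ + 1 => ([], 0, false)
  | [a], _ + 1 => ([a], 0, false)
  | a :: b :: t, k + 1 =>
      if a.1 > b.1 then
        let r := psortInner (a :: t) k
        (b :: r.1, r.2.1 + 1, true)
      else
        let r := psortInner (b :: t) k
        (a :: r.1, r.2.1, r.2.2)

-- outer loop `for i in range(larr): … if not swapped: break`; fuel f+1 left means i = larr-(f+1), so the
-- inner bound larr-i-1 equals f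
def psortOuter : Nat → List (Int × Int) → Int → List (Int × Int) × Int
  | 0, l, c => (l, c)
  | f + 1, l, c =>
      let p := psortInner l f
      if p.2.2 then psortOuter f p.1 (c + p.2.1) else (p.1, c + p.2.1)

def paritysort_int (arr : List Int) : Int × List Int :=
  let parr := arr.map (fun i => (PySem.Int.mod i 2, i))      -- [[i % 2, i] for i in arr]
  let res := psortOuter arr.length parr 0
  (res.2, res.1.map (fun v => v.2))                          -- arr[indx] = val[1]; return swap_count, arr

-- ===== PORT B =====
def paritysort_int_alt (arr : List Int) : Int × List Int :=
  let st := arr.foldl (fun (st : Int × Int × List Int × List Int) x =>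
      if PySem.Int.mod x 2 = 0 then (st.1 + st.2.1, st.2.1, st.2.2.1 ++ [x], st.2.2.2)
      else (st.1, st.2.1 + 1, st.2.2.1, st.2.2.2 ++ [x])) (0, 0, ([] : List Int), ([] : List Int))
  (st.1, st.2.2.1 ++ st.2.2.2)

-- ===== PRECONDITION & SPEC =====
def Spec_paritysort_int (arr : List Int) (out : Int × List Int) : Prop := out = paritysort_int_alt arr
instance (arr : List Int) (out : Int × List Int) : Decidable (Spec_paritysort_int arr out) := by unfold Spec_paritysort_int; infer_instance

-- ===== CLAIM (what is proved, stated in full; the proofs are below) =====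
def Claim_equal_paritysort_int : Prop := ∀ (arr : List Int), Dom_paritysort_int arr → Spec_paritysort_int arr (paritysort_int arr)

-- ===== LEMMAS AND PROOFS =====

-- keys are parities: every key is 0 or 1
def isK (l : List (Int × Int)) : Prop := ∀ p ∈ l, p.1 = 0 ∨ p.1 = 1

def evQ (p : Int × Int) : Bool := p.1 == 0
def odQ (p : Int × Int) : Bool := !(p.1 == 0)

-- inversion count of a 0/1-keyed pair list
def invC : List (Int × Int) → Int
  | [] => 0
  | p :: t => (if p.1 = 0 then 0 else ((t.filter evQ).length : Int)) + invC t

def srt (l : List (Int × Int)) : Prop := l.Pairwise (fun a b => a.1 ≤ b.1)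

theorem isK_mid (a b : Int × Int) (t : List (Int × Int)) (h : isK (a :: b :: t)) :
    isK (a :: t) ∧ isK (b :: t) := by
  constructor <;> (intro p hp; apply h; simp at hp ⊢; tauto)

theorem srt_const1 (l : List (Int × Int)) (h : ∀ p ∈ l, p.1 = 1) : srt l := by
  induction l with
  | nil => exact List.Pairwise.nil
  | cons a t ih =>
      refine List.Pairwise.cons ?_ (ih fun p hp => h p (by simp [hp]))
      intro b hb
      rw [h a (by simp), h b (by simp [hb])]

theorem pass_filter_ev (l : List (Int × Int)) (k : Nat) (hK : isK l) :
    (psortInner l k).1.filter evQ = l.filter evQ := by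
  induction l, k using psortInner.induct with
  | case1 l => simp [psortInner]
  | case2 k => simp [psortInner]
  | case3 a k => simp [psortInner]
  | case4 a b t k hgt ih =>
      have ha := hK a (by simp); have hb := hK b (by simp)
      have ha1 : a.1 = 1 := by omega
      have hb0 : b.1 = 0 := by omega
      simp only [psortInner, if_pos hgt]
      rw [List.filter_cons, List.filter_cons, List.filter_cons]
      simp [evQ, ha1, hb0, ih (isK_mid a b t hK).1]
  | case5 a b t k hgt ih =>
      simp only [psortInner, if_neg hgt]
      rw [List.filter_cons, ih (isK_mid a b t hK).2]; simp [List.filter_cons]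

theorem pass_filter_od (l : List (Int × Int)) (k : Nat) (hK : isK l) :
    (psortInner l k).1.filter odQ = l.filter odQ := by
  induction l, k using psortInner.induct with
  | case1 l => simp [psortInner]
  | case2 k => simp [psortInner]
  | case3 a k => simp [psortInner]
  | case4 a b t k hgt ih =>
      have ha := hK a (by simp); have hb := hK b (by simp)
      have ha1 : a.1 = 1 := by omega
      have hb0 : b.1 = 0 := by omega
      simp only [psortInner, if_pos hgt]
      rw [List.filter_cons, List.filter_cons, List.filter_cons]
      simp [odQ, ha1, hb0, ih (isK_mid a b t hK).1]
  | case5 a b t k hgt ih =>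
      simp only [psortInner, if_neg hgt]
      rw [List.filter_cons, ih (isK_mid a b t hK).2]; simp [List.filter_cons]

theorem pass_K (l : List (Int × Int)) (k : Nat) (hK : isK l) : isK (psortInner l k).1 := by
  induction l, k using psortInner.induct with
  | case1 l => simpa [psortInner] using hK
  | case2 k => simp [psortInner, isK]
  | case3 a k => simpa [psortInner] using hK
  | case4 a b t k hgt ih =>
      simp only [psortInner, if_pos hgt]
      intro p hp
      rcases List.mem_cons.1 hp with h | h
      · exact h ▸ hK b (by simp)
      · exact ih (isK_mid a b t hK).1 p h
  | case5 a b t k hgt ih =>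
      simp only [psortInner, if_neg hgt]
      intro p hp
      rcases List.mem_cons.1 hp with h | h
      · exact h ▸ hK a (by simp)
      · exact ih (isK_mid a b t hK).2 p h

theorem pass_inv (l : List (Int × Int)) (k : Nat) (hK : isK l) :
    (psortInner l k).2.1 + invC (psortInner l k).1 = invC l := by
  induction l, k using psortInner.induct with
  | case1 l => simp [psortInner]
  | case2 k => simp [psortInner]
  | case3 a k => simp [psortInner]
  | case4 a b t k hgt ih =>
      have ha := hK a (by simp); have hb := hK b (by simp)
      have ha1 : a.1 = 1 := by omega
      have hb0 : b.1 = 0 := by omega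
      have hI := ih (isK_mid a b t hK).1
      have hbe : evQ b = true := by simp [evQ, hb0]
      simp only [psortInner, if_pos hgt]
      simp [invC, evQ, ha1, hb0] at hI ⊢
      omega
  | case5 a b t k hgt ih =>
      have hI := ih (isK_mid a b t hK).2
      have hf := pass_filter_ev (b :: t) k (isK_mid a b t hK).2
      have e1 : ∀ (x : Int × Int) (xs : List (Int × Int)),
          invC (x :: xs) = (if x.1 = 0 then 0 else ((xs.filter evQ).length : Int)) + invC xs :=
        fun x xs => rfl
      simp only [psortInner, if_neg hgt]
      rw [e1 a, e1 a, hf]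
      omega

theorem pass_nswap (l : List (Int × Int)) (k : Nat) (h : (psortInner l k).2.2 = false) :
    (psortInner l k).1 = l ∧ (psortInner l k).2.1 = 0 := by
  induction l, k using psortInner.induct with
  | case1 l => simp [psortInner]
  | case2 k => simp [psortInner]
  | case3 a k => simp [psortInner]
  | case4 a b t k hgt ih => simp [psortInner, if_pos hgt] at h
  | case5 a b t k hgt ih =>
      simp only [psortInner, if_neg hgt] at h ⊢
      obtain ⟨h1, h2⟩ := ih h
      simp [h1, h2]

theorem pass_nswap_srt (l : List (Int × Int)) (k : Nat) (hK : isK l)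
    (h : (psortInner l k).2.2 = false) (hs : ∀ p ∈ l.drop (k + 1), p.1 = 1) : srt l := by
  induction l, k using psortInner.induct with
  | case1 l =>
      match l, hs with
      | [], _ => exact List.Pairwise.nil
      | a :: t, hs =>
          refine List.Pairwise.cons ?_ (srt_const1 t (by simpa using hs))
          intro b hb
          have := hK a (by simp)
          have hb1 : b.1 = 1 := by simpa using hs b hb
          omega
  | case2 k => exact List.Pairwise.nil
  | case3 a k => simp [srt]
  | case4 a b t k hgt ih => simp [psortInner, if_pos hgt] at h
  | case5 a b t k hgt ih =>
      simp only [psortInner, if_neg hgt] at h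
      have hs' : ∀ p ∈ (b :: t).drop (k + 1), p.1 = 1 := by
        intro p hp; exact hs p (by simpa using hp)
      have htail := ih (isK_mid a b t hK).2 h hs'
      refine List.Pairwise.cons ?_ htail
      intro c hc
      have ha := hK a (by simp)
      have hc' := (isK_mid a b t hK).2 c hc
      rcases List.mem_cons.1 hc with rfl | hct
      · omega
      · rcases ha with ha0 | ha1
        · omega
        · have hb := hK b (by simp)
          have hb1 : b.1 = 1 := by omega
          have := (List.pairwise_cons.1 htail).1 c hct
          omega

theorem pass_srt (l : List (Int × Int)) (k : Nat) (h : srt l) :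
    psortInner l k = (l, 0, false) := by
  induction l, k using psortInner.induct with
  | case1 l => simp [psortInner]
  | case2 k => simp [psortInner]
  | case3 a k => simp [psortInner]
  | case4 a b t k hgt ih =>
      exact absurd ((List.pairwise_cons.1 h).1 b (by simp)) (by omega)
  | case5 a b t k hgt ih =>
      have htail : srt (b :: t) := (List.pairwise_cons.1 h).2
      simp [psortInner, if_neg hgt, ih htail]

theorem pass_suffix (l : List (Int × Int)) (k : Nat) (hK : isK l)
    (h1 : ∃ p ∈ l.take (k + 1), p.1 = 1) (h2 : ∀ p ∈ l.drop (k + 1), p.1 = 1) :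
    ∀ p ∈ (psortInner l k).1.drop k, p.1 = 1 := by
  induction l, k using psortInner.induct with
  | case1 l =>
      -- k = 0 : result is l; the head is odd and the tail is odd, so all of l is odd
      simp only [psortInner, List.drop_zero]
      obtain ⟨q, hq, hq1⟩ := h1
      intro p hp
      match l, hq, hp, h2 with
      | a :: t, hq, hp, h2 =>
          simp at hq
          rcases List.mem_cons.1 hp with rfl | hpt
          · rw [← hq]; exact hq1
          · exact h2 p (by simpa using hpt)
  | case2 k => simp [psortInner]
  | case3 a k =>
      simp only [psortInner]
      obtain ⟨q, hq, hq1⟩ := h1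
      simp at hq
      intro p hp
      have hpa : p = a := by
        have := List.mem_of_mem_drop hp
        simpa using this
      rw [hpa, ← hq]; exact hq1
  | case4 a b t k hgt ih =>
      have ha := hK a (by simp); have hb := hK b (by simp)
      have ha1 : a.1 = 1 := by omega
      simp only [psortInner, if_pos hgt, List.drop_succ_cons]
      exact ih (isK_mid a b t hK).1 ⟨a, by simp, ha1⟩ (fun p hp => h2 p (by simpa using hp))
  | case5 a b t k hgt ih =>
      simp only [psortInner, if_neg hgt, List.drop_succ_cons]
      have hb := hK b (by simp)
      have h1' : ∃ p ∈ (b :: t).take (k + 1), p.1 = 1 := by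
        obtain ⟨q, hq, hq1⟩ := h1
        rw [List.take_succ_cons] at hq
        rcases List.mem_cons.1 hq with rfl | hqt
        · -- the witness was a; then b is also odd since no swap happened
          exact ⟨b, by simp, by omega⟩
        · exact ⟨q, by simpa using hqt, hq1⟩
      exact ih (isK_mid a b t hK).2 h1' (fun p hp => h2 p (by simpa using hp))

theorem unsorted_take (l : List (Int × Int)) (k : Nat) (hK : isK l)
    (h2 : ∀ p ∈ l.drop (k + 1), p.1 = 1) (hns : ¬ srt l) :
    ∃ p ∈ l.take (k + 1), p.1 = 1 := by
  by_contra hno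
  simp only [not_exists, not_and] at hno
  apply hns
  have hdecomp := (List.take_append_drop (k + 1) l).symm
  rw [hdecomp, srt, List.pairwise_append]
  refine ⟨?_, ?_, ?_⟩
  · -- take part: all keys 0
    refine List.Pairwise.imp ?_ (List.pairwise_of_forall_mem_list (l := l.take (k+1)) (r := fun a b => a.1 = 0 ∧ b.1 = 0) ?_)
    · rintro a b ⟨ha, hb⟩; omega
    · intro a ha b hb
      have hKa := hK a (List.mem_of_mem_take ha)
      have hKb := hK b (List.mem_of_mem_take hb)
      exact ⟨by have := hno a ha; omega, by have := hno b hb; omega⟩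
  · exact srt_const1 _ h2
  · intro a ha b hb
    have hKa := hK a (List.mem_of_mem_take ha)
    have := hno a ha
    have := h2 b hb
    omega

theorem srt_decomp (l : List (Int × Int)) (hK : isK l) (h : srt l) :
    l = l.filter evQ ++ l.filter odQ := by
  induction l with
  | nil => simp
  | cons a t ih =>
      have ha := hK a (by simp)
      have htail : srt t := (List.pairwise_cons.1 h).2
      have hKt : isK t := fun p hp => hK p (by simp [hp])
      rcases ha with ha0 | ha1
      · rw [List.filter_cons, List.filter_cons]
        simp only [evQ, odQ, ha0]
        simpa using ih hKt htail
      · -- head odd: all of t odd, so no evens anywhere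
        have htall : ∀ p ∈ t, p.1 = 1 := by
          intro p hp
          have h1 := (List.pairwise_cons.1 h).1 p hp
          have h2 := hKt p hp
          omega
        have hev : (a :: t).filter evQ = [] := by
          rw [List.filter_eq_nil_iff]
          intro p hp
          rcases List.mem_cons.1 hp with rfl | hpt
          · simp [evQ, ha1]
          · simp [evQ, htall p hpt]
        have hod : (a :: t).filter odQ = a :: t := by
          rw [List.filter_eq_self]
          intro p hp
          rcases List.mem_cons.1 hp with rfl | hpt
          · simp [odQ, ha1]
          · simp [odQ, htall p hpt]
        rw [hev, hod]; simp

theorem srt_inv (l : List (Int × Int)) (hK : isK l) (h : srt l) : invC l = 0 := by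
  induction l with
  | nil => simp [invC]
  | cons a t ih =>
      have ha := hK a (by simp)
      have htail : srt t := (List.pairwise_cons.1 h).2
      have hKt : isK t := fun p hp => hK p (by simp [hp])
      rcases ha with ha0 | ha1
      · simp [invC, ha0, ih hKt htail]
      · have hev : t.filter evQ = [] := by
          rw [List.filter_eq_nil_iff]
          intro p hp
          have h1 := (List.pairwise_cons.1 h).1 p hp
          have h2 := hKt p hp
          simp [evQ]; omega
        simp [invC, ha1, hev, ih hKt htail]

theorem outer_main (f : Nat) (l : List (Int × Int)) (c : Int) (hK : isK l)
    (hinv : srt l ∨ ∀ p ∈ l.drop f, p.1 = 1) :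
    psortOuter f l c = (l.filter evQ ++ l.filter odQ, c + invC l) := by
  induction f generalizing l c with
  | zero =>
      have hsrt : srt l := by
        rcases hinv with h | h
        · exact h
        · exact srt_const1 l (by simpa using h)
      simp [psortOuter, srt_inv l hK hsrt, ← srt_decomp l hK hsrt]
  | succ f ih =>
      by_cases hsrt : srt l
      · rw [psortOuter, pass_srt l f hsrt]
        simp [srt_inv l hK hsrt, ← srt_decomp l hK hsrt]
      · have hsuf : ∀ p ∈ l.drop (f + 1), p.1 = 1 := by
          rcases hinv with h | h
          · exact absurd h hsrt
          · exact h
        have htake := unsorted_take l f hK hsuf hsrt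
        have hsufr := pass_suffix l f hK htake hsuf
        rw [psortOuter]
        by_cases hsw : (psortInner l f).2.2
        · rw [if_pos hsw]
          rw [ih (psortInner l f).1 (c + (psortInner l f).2.1) (pass_K l f hK) (Or.inr hsufr)]
          rw [pass_filter_ev l f hK, pass_filter_od l f hK]
          have := pass_inv l f hK
          congr 1
          omega
        · rw [if_neg hsw]
          obtain ⟨h1, h2⟩ := pass_nswap l f (by simpa using hsw)
          exact absurd (pass_nswap_srt l f hK (by simpa using hsw) hsuf) hsrt

-- value-level versions for B
def evP (x : Int) : Bool := PySem.Int.mod x 2 == 0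
def odP (x : Int) : Bool := !(PySem.Int.mod x 2 == 0)
def keyf (x : Int) : Int × Int := (PySem.Int.mod x 2, x)

def vinv : List Int → Int
  | [] => 0
  | x :: t => (if PySem.Int.mod x 2 = 0 then 0 else ((t.filter evP).length : Int)) + vinv t

theorem map_filter_ev (xs : List Int) : (xs.map keyf).filter evQ = (xs.filter evP).map keyf := by
  induction xs with
  | nil => simp
  | cons x t ih =>
      simp only [List.map_cons, List.filter_cons, show evQ (keyf x) = evP x from rfl]
      cases h : evP x <;> simp [ih]
theorem map_filter_od (xs : List Int) : (xs.map keyf).filter odQ = (xs.filter odP).map keyf := by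
  induction xs with
  | nil => simp
  | cons x t ih =>
      simp only [List.map_cons, List.filter_cons, show odQ (keyf x) = odP x from rfl]
      cases h : odP x <;> simp [ih]
theorem invC_map (xs : List Int) : invC (xs.map keyf) = vinv xs := by
  induction xs with
  | nil => simp [invC, vinv]
  | cons x t ih =>
      show (if (keyf x).1 = 0 then 0 else (((t.map keyf).filter evQ).length : Int)) + invC (t.map keyf)
          = (if PySem.Int.mod x 2 = 0 then 0 else ((t.filter evP).length : Int)) + vinv t
      rw [map_filter_ev, List.length_map, ih]
      rfl
theorem keyf_K (xs : List Int) : isK (xs.map keyf) := by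
  intro p hp
  obtain ⟨x, _, rfl⟩ := List.mem_map.1 hp
  have h1 := PySem.Int.mod_nonneg x (by omega : (0:Int) < 2)
  have h2 := PySem.Int.mod_lt x (by omega : (0:Int) < 2)
  simp only [keyf]
  omega

theorem alt_fold (xs : List Int) (sw os : Int) (ev od : List Int) :
    xs.foldl (fun (st : Int × Int × List Int × List Int) x =>
      if PySem.Int.mod x 2 = 0 then (st.1 + st.2.1, st.2.1, st.2.2.1 ++ [x], st.2.2.2)
      else (st.1, st.2.1 + 1, st.2.2.1, st.2.2.2 ++ [x])) (sw, os, ev, od) =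
    (sw + os * ((xs.filter evP).length : Int) + vinv xs, os + ((xs.filter odP).length : Int),
      ev ++ xs.filter evP, od ++ xs.filter odP) := by
  induction xs generalizing sw os ev od with
  | nil => simp [vinv]
  | cons x t ih =>
      have hv : vinv (x :: t)
          = (if PySem.Int.mod x 2 = 0 then 0 else ((t.filter evP).length : Int)) + vinv t := rfl
      rw [List.foldl_cons]
      by_cases h : PySem.Int.mod x 2 = 0
      · have he : evP x = true := by unfold evP; rw [h]; rfl
        have ho : odP x = false := by unfold odP; rw [h]; rfl
        rw [if_pos h, ih, List.filter_cons_of_pos he, List.filter_cons_of_neg (by simp [ho]),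
          hv, if_pos h]
        simp only [Prod.mk.injEq, List.length_cons, List.append_assoc, List.singleton_append]
        refine ⟨?_, trivial⟩
        push_cast; ring
      · have he : evP x = false := by unfold evP; simp only [beq_eq_false_iff_ne, ne_eq]; exact h
        have ho : odP x = true := by unfold odP; simp only [beq_eq_false_iff_ne, ne_eq, Bool.not_eq_true']; exact h
        rw [if_neg h, ih, List.filter_cons_of_neg (by simp [he]), List.filter_cons_of_pos ho,
          hv, if_neg h]
        simp only [Prod.mk.injEq, List.length_cons, List.append_assoc, List.singleton_append]
        refine ⟨?_, ?_, trivial⟩ <;> (push_cast; ring)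

theorem main_eq (arr : List Int) : paritysort_int arr = paritysort_int_alt arr := by
  have hmap : (arr.map (fun i => (PySem.Int.mod i 2, i))) = arr.map keyf := rfl
  have hdrop : (arr.map keyf).drop arr.length = [] := by rw [List.drop_eq_nil_iff]; simp
  unfold paritysort_int paritysort_int_alt
  rw [hmap, alt_fold]
  refine Eq.trans (b := ((psortOuter arr.length (arr.map keyf) 0).2,
      (psortOuter arr.length (arr.map keyf) 0).1.map (fun v => v.2))) rfl ?_
  rw [outer_main arr.length (arr.map keyf) 0 (keyf_K arr)
      (Or.inr (by rw [hdrop]; intro p hp; simp at hp))]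
  rw [map_filter_ev, map_filter_od, invC_map]
  have hid : ((fun v : Int × Int => v.2) ∘ keyf) = id := rfl
  simp [List.map_append, List.map_map, hid]

-- ===== VERDICT (by name: the statement is the Claim_ definition above) =====
theorem paritysort_int_spec : Claim_equal_paritysort_int := by
  intro arr _
  show _ = _
  exact main_eq arr
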